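-- pv_equiv track=rewrite | github.com/DEOWL-kan/ai-image-trust-scanner | app/services/error_taxonomy.py | choose_primary_root_cause
-- ===== SOURCE A (Python) =====
-- def choose_primary_root_cause(tags: list[str]) -> str:
--     order = (
--         "realistic_ai",
--         "no_exif_jpeg",
--         "metadata_dependency",
--         "resolution_flip",
--         "format_bias",
--         "high_compression",
--         "source_folder_bias",
--         "low_texture",
--         "score_overlap",
--         "uncertain_boundary",
--         "unknown",
--     )
--     for tag in order:
--         if tag in tags:
--             return tag
--     return tags[0] if tags else "unknown"
-- ===== SOURCE B (Python) =====
-- def choose_primary_root_cause(tags: list[str]) -> str: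
--     order = (
--         "realistic_ai",
--         "no_exif_jpeg",
--         "metadata_dependency",
--         "resolution_flip",
--         "format_bias",
--         "high_compression",
--         "source_folder_bias",
--         "low_texture",
--         "score_overlap",
--         "uncertain_boundary",
--         "unknown",
--     )
--     rank = {t: i for i, t in enumerate(order)}
--     best = None  # (rank, tag) with smallest rank seen so far
--     for t in tags:
--         r = rank.get(t)
--         if r is not None and (best is None or r < best[0]):
--             best = (r, t)
--     if best is not None:
--         return best[1]
--     return tags[0] if tags else "unknown"
-- ===== Notes on version B (the rewrite author's own statement) =====
-- stated objective: alternative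
-- what changed: Instead of scanning the fixed priority list with a membership test into the input for each priority tag (O(|order|*n)), B builds a rank dict once and makes a single pass over the input tags tracking the minimum-rank tag seen.
import Mathlib
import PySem

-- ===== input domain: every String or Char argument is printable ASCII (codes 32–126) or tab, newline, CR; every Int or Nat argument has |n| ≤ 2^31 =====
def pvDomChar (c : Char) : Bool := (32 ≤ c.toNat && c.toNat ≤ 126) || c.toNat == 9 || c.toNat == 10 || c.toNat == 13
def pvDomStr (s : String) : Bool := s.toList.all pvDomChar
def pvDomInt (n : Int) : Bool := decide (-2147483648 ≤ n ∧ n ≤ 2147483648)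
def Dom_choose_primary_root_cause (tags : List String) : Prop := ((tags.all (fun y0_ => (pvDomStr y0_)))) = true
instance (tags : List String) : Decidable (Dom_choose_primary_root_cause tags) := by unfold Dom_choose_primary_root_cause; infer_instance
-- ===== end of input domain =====

-- B replaces A's scan of the fixed priority list (a membership test into the input per
-- priority tag) by a single pass over the input tags tracking the minimum-rank tag via a
-- rank dict; objective: alternative.

-- ===== PORT A =====
def pvOrder : List String :=
  ["realistic_ai", "no_exif_jpeg", "metadata_dependency", "resolution_flip",
   "format_bias", "high_compression", "source_folder_bias", "low_texture",
   "score_overlap", "uncertain_boundary", "unknown"]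

-- the 'for tag in order: if tag in tags: return tag' loop, then the trailing fallback
def pvLoopA (tags : List String) : List String → String
  | [] => match tags with | [] => "unknown" | t :: _ => t
  | o :: os => if o ∈ tags then o else pvLoopA tags os

def choose_primary_root_cause (tags : List String) : String :=
  pvLoopA tags pvOrder

-- ===== PORT B =====
-- rank = {t: i for i, t in enumerate(order)}  (the literal dict this comprehension builds)
def pvRank : PySem.Dict String Nat :=
  PySem.Dict.mk
    [("realistic_ai", 0), ("no_exif_jpeg", 1), ("metadata_dependency", 2),
     ("resolution_flip", 3), ("format_bias", 4), ("high_compression", 5),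
     ("source_folder_bias", 6), ("low_texture", 7), ("score_overlap", 8),
     ("uncertain_boundary", 9), ("unknown", 10)]

-- loop body: r = rank.get(t); if r is not None and (best is None or r < best[0]): best = (r, t)
def pvStep (best : Option (Nat × String)) (t : String) : Option (Nat × String) :=
  match pvRank.get? t with
  | none => best
  | some r =>
    match best with
    | none => some (r, t)
    | some (rb, tb) => if r < rb then some (r, t) else some (rb, tb)

def choose_primary_root_cause_alt (tags : List String) : String :=
  match tags.foldl pvStep none with
  | some (_, t) => t
  | none => match tags with | [] => "unknown" | t :: _ => t

-- ===== PRECONDITION & SPEC =====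
def Spec_choose_primary_root_cause (tags : List String) (out : String) : Prop := out = choose_primary_root_cause_alt tags
instance (tags : List String) (out : String) : Decidable (Spec_choose_primary_root_cause tags out) := by unfold Spec_choose_primary_root_cause; infer_instance

-- ===== CLAIM (what is proved, stated in full; the proofs are below) =====
def Claim_equal_choose_primary_root_cause : Prop := ∀ (tags : List String), Dom_choose_primary_root_cause tags → Spec_choose_primary_root_cause tags (choose_primary_root_cause tags)

-- ===== LEMMAS AND PROOFS =====

def pvKeyOf (r : Nat) : String := pvOrder.getD r ""

-- characterisation of the rank dict: get? t = some r exactly when t is the r-th priority tag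
set_option maxHeartbeats 1000000 in
theorem pvRank_char (t : String) (r : Nat) :
    pvRank.get? t = some r ↔ r < 11 ∧ t = pvKeyOf r := by
  have hget : pvRank.get? t =
      if "realistic_ai" = t then some 0 else if "no_exif_jpeg" = t then some 1
      else if "metadata_dependency" = t then some 2 else if "resolution_flip" = t then some 3
      else if "format_bias" = t then some 4 else if "high_compression" = t then some 5
      else if "source_folder_bias" = t then some 6 else if "low_texture" = t then some 7
      else if "score_overlap" = t then some 8 else if "uncertain_boundary" = t then some 9
      else if "unknown" = t then some 10 else none := by
    simp only [pvRank, PySem.Dict.get?_mk_cons, beq_iff_eq]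
    simp only [show (PySem.Dict.mk ([] : List (String × Nat))).get? t = none from rfl]
  rw [hget]
  split_ifs with h0 h1 h2 h3 h4 h5 h6 h7 h8 h9 h10 <;>
    [skip; skip; skip; skip; skip; skip; skip; skip; skip; skip; skip;
     · simp only [false_iff, not_and]
       rintro hr rfl
       interval_cases r <;> simp_all [pvKeyOf, pvOrder]] <;>
  · subst_vars
    simp only [Option.some.injEq]
    constructor
    · rintro rfl; exact ⟨by omega, by decide⟩
    · rintro ⟨hr, hkey⟩
      interval_cases r <;> first | rfl | (exfalso; revert hkey; decide)

theorem pvRank_keyOf (r : Nat) (hr : r < 11) : pvRank.get? (pvKeyOf r) = some r :=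
  (pvRank_char _ _).mpr ⟨hr, rfl⟩

-- the rank-only shadow of pvStep
def pvMinStep (m : Option Nat) (t : String) : Option Nat :=
  match pvRank.get? t with
  | none => m
  | some r => match m with | none => some r | some mr => some (min r mr)

-- the B fold carries exactly the priority tag of its rank alongside it
theorem foldB_eq (tags : List String) :
    ∀ m : Option Nat,
      tags.foldl pvStep (m.map (fun r => (r, pvKeyOf r))) =
        (tags.foldl pvMinStep m).map (fun r => (r, pvKeyOf r)) := by
  induction tags with
  | nil => intro m; rfl
  | cons t ts ih =>
    intro m
    have hstep : pvStep (m.map (fun r => (r, pvKeyOf r))) t =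
        (pvMinStep m t).map (fun r => (r, pvKeyOf r)) := by
      unfold pvStep pvMinStep
      cases hg : pvRank.get? t with
      | none => simp
      | some r =>
        obtain ⟨-, rfl⟩ := (pvRank_char _ _).mp hg
        cases m with
        | none => simp
        | some mr =>
          by_cases h : r < mr
          · simp [h, Nat.min_eq_left (Nat.le_of_lt h)]
          · simp [h, Nat.min_eq_right (Nat.le_of_not_lt h)]
    simp only [List.foldl_cons, hstep, ih]

-- the rank fold computes the minimum of the ranks present in tags
theorem foldMin_some (ts : List String) :
    ∀ a : Nat, ts.foldl pvMinStep (some a) =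
      some ((ts.filterMap pvRank.get?).foldl min a) := by
  induction ts with
  | nil => intro a; rfl
  | cons t ts ih =>
    intro a
    simp only [List.foldl_cons, List.filterMap_cons]
    cases hg : pvRank.get? t with
    | none =>
      rw [show pvMinStep (some a) t = some a from by simp [pvMinStep, hg]]
      simp [ih]
    | some r =>
      rw [show pvMinStep (some a) t = some (min r a) from by simp [pvMinStep, hg]]
      simp [ih, Nat.min_comm]

theorem foldMin_eq (tags : List String) :
    tags.foldl pvMinStep none = (tags.filterMap pvRank.get?).min? := by
  induction tags with
  | nil => rfl
  | cons t ts ih =>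
    simp only [List.foldl_cons, List.filterMap_cons]
    cases hg : pvRank.get? t with
    | none =>
      rw [show pvMinStep none t = none from by simp [pvMinStep, hg]]
      simpa using ih
    | some r =>
      rw [show pvMinStep none t = some r from by simp [pvMinStep, hg]]
      rw [foldMin_some ts r, List.min?_cons']

-- B through the min characterisation
theorem alt_eq_min (tags : List String) :
    choose_primary_root_cause_alt tags =
      match (tags.filterMap pvRank.get?).min? with
      | some r => pvKeyOf r
      | none => match tags with | [] => "unknown" | t :: _ => t := by
  unfold choose_primary_root_cause_alt
  have h := foldB_eq tags none
  simp only [Option.map_none] at h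
  rw [h, foldMin_eq]
  cases (tags.filterMap pvRank.get?).min? <;> rfl

-- A skips the prefix of priority tags absent from the input
theorem loopA_drop (tags : List String) :
    ∀ k : Nat, k ≤ 11 → (∀ i, i < k → pvKeyOf i ∉ tags) →
      pvLoopA tags pvOrder = pvLoopA tags (pvOrder.drop k) := by
  intro k
  induction k with
  | zero => intro _ _; rfl
  | succ k ih =>
    intro hk habs
    have hk' : k < pvOrder.length := by simp [pvOrder]; omega
    rw [ih (by omega) (fun i hi => habs i (by omega)),
        List.drop_eq_getElem_cons hk']
    have hkey : pvOrder[k] = pvKeyOf k := by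
      simp [pvKeyOf, List.getD, List.getElem?_eq_getElem hk']
    rw [hkey]
    simp [pvLoopA, habs k (Nat.lt_succ_self k)]

-- ===== VERDICT (by name: the statement is the Claim_ definition above) =====
theorem choose_primary_root_cause_spec : Claim_equal_choose_primary_root_cause := by
  intro tags _
  unfold Spec_choose_primary_root_cause
  rw [alt_eq_min tags]
  unfold choose_primary_root_cause
  cases hmin : (tags.filterMap pvRank.get?).min? with
  | none =>
    -- no input tag has a rank: every priority tag is absent from the input
    have habs : ∀ i, i < 11 → pvKeyOf i ∉ tags := by
      intro i hi hmem
      have : (i : Nat) ∈ tags.filterMap pvRank.get? :=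
        List.mem_filterMap.mpr ⟨pvKeyOf i, hmem, pvRank_keyOf i hi⟩
      rw [List.min?_eq_none_iff.mp hmin] at this
      simp at this
    rw [loopA_drop tags 11 (by omega) habs]
    cases tags <;> rfl
  | some r =>
    obtain ⟨hrmem, hrmin⟩ := List.min?_eq_some_iff.mp hmin
    obtain ⟨t, htmem, htr⟩ := List.mem_filterMap.mp hrmem
    obtain ⟨hr11, rfl⟩ := (pvRank_char _ _).mp htr
    have habs : ∀ i, i < r → pvKeyOf i ∉ tags := by
      intro i hir hmem
      have hin : (i : Nat) ∈ tags.filterMap pvRank.get? :=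
        List.mem_filterMap.mpr ⟨pvKeyOf i, hmem, pvRank_keyOf i (by omega)⟩
      have := hrmin i hin
      omega
    rw [loopA_drop tags r (by omega) habs]
    have hr' : r < pvOrder.length := by simp [pvOrder]; omega
    rw [List.drop_eq_getElem_cons hr']
    have hkey : pvOrder[r] = pvKeyOf r := by
      simp [pvKeyOf, List.getD, List.getElem?_eq_getElem hr']
    rw [hkey]
    simp [pvLoopA, htmem]
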